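-- pv_equiv track=rewrite | github.com/evelandy/ecomm-1 | server/test.py | high_card
-- ===== SOURCE A (Python) =====
-- def high_card(cards):
--     high_to_low = ['A', 'K', 'Q', 'J', '10', '9', '8', '7', '6', '5', '4', '3', '2']
--     card_obj = {}
--     for card in cards.split():
--         if len(card) == 3:
--             kind = card[:2]
--         else:
--             kind = card[0]
--         suit = card[-1]
--         card_obj[kind] = suit
--     for card in high_to_low:
--         for key, val in card_obj.items():
--             if card == key:
--                 return "High Card: {}".format(key + val)
-- ===== SOURCE B (Python) =====
-- def high_card(cards):
--     order = {r: i for i, r in enumerate(['A', 'K', 'Q', 'J', '10', '9', '8', '7', '6', '5', '4', '3', '2'])}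
--     best_i, best = 13, None
--     for card in cards.split():
--         kind = card[:2] if len(card) == 3 else card[0]
--         i = order.get(kind)
--         if i is not None and i <= best_i:
--             best_i, best = i, kind + card[-1]
--     if best is not None:
--         return "High Card: {}".format(best)
-- ===== Notes on version B (the rewrite author's own statement) =====
-- stated objective: simpler
-- what changed: Replaces A's dict-of-all-cards plus 13-rank nested rescan of the dict with a single pass over the cards that keeps the best (lowest) rank index seen, using a rank-to-priority dict and a <=-update so the last card of the winning rank supplies the suit exactly as A's dict overwrite does.
import Mathlib
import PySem

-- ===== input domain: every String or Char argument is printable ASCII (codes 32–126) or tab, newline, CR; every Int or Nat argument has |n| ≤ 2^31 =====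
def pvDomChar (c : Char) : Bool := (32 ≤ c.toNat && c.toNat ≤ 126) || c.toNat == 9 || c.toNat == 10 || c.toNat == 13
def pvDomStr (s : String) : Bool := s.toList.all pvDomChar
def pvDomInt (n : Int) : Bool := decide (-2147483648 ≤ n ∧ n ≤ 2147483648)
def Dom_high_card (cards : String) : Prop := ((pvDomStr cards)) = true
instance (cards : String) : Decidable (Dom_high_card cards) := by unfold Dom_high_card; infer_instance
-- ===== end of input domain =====

-- B replaces A's dict-of-cards + 13-rank rescan by a single best-so-far pass over the cards (simpler, one pass).

-- ===== PORT A =====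
-- A's `high_to_low` list of ranks
def hcRanks : List String := ["A", "K", "Q", "J", "10", "9", "8", "7", "6", "5", "4", "3", "2"]

-- `card[:2] if len(card)==3 else card[0]`; `card` comes from split() so it is nonempty and
-- the `.getD ' '` default of card[0] is never reached
def hcKind (card : String) : String :=
  if PySem.Str.len card = 3 then PySem.Str.slice card none (some 2)
  else String.ofList [(PySem.Str.pyGet? card 0).getD ' ']

-- `card[-1]`, same unreachable default
def hcSuit (card : String) : String :=
  String.ofList [(PySem.Str.pyGet? card (-1)).getD ' ']

-- first loop: `card_obj[kind] = suit` over cards.split()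
def hcBuild (ws : List String) : PySem.Dict String String :=
  ws.foldl (fun d card => d.insert (hcKind card) (hcSuit card)) PySem.Dict.empty

-- inner loop: `for key, val in card_obj.items(): if card == key: return …`
def hcFindRank (items : List (String × String)) (rank : String) : Option String :=
  match items with
  | [] => none
  | (k, v) :: rest =>
      if rank = k then some ("High Card: " ++ (k ++ v)) else hcFindRank rest rank

-- outer loop: `for card in high_to_low: …`; falls through returning None
def hcSearch (ranks : List String) (d : PySem.Dict String String) : Option String :=
  match ranks with
  | [] => none
  | r :: rs =>
      match hcFindRank d.items r with
      | some s => some s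
      | none => hcSearch rs d

def high_card (cards : String) : Option String :=
  hcSearch hcRanks (hcBuild (PySem.Str.split₀ cards))

-- ===== PORT B =====
-- `order = {r: i for i, r in enumerate([...])}`
def hcOrder : PySem.Dict String Int :=
  PySem.Dict.ofList (hcRanks.zipIdx.map (fun p => (p.1, (p.2 : Int))))

-- B's loop body: update (best_i, best) when the card's rank index improves or ties
def hcStep (st : Int × Option String) (card : String) : Int × Option String :=
  match hcOrder.get? (hcKind card) with
  | some i => if i ≤ st.1 then (i, some (hcKind card ++ hcSuit card)) else st
  | none => st

def high_card_alt (cards : String) : Option String :=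
  let st := (PySem.Str.split₀ cards).foldl hcStep (13, none)
  st.2.map (fun b => "High Card: " ++ b)

-- ===== PRECONDITION & SPEC =====
def Spec_high_card (cards : String) (out : Option String) : Prop := out = high_card_alt cards
instance (cards : String) (out : Option String) : Decidable (Spec_high_card cards out) := by unfold Spec_high_card; infer_instance

-- ===== CLAIM (what is proved, stated in full; the proofs are below) =====
def Claim_equal_high_card : Prop := ∀ (cards : String), Dom_high_card cards → Spec_high_card cards (high_card cards)

-- ===== LEMMAS AND PROOFS =====

-- Invariant tying A's dict to B's (best_i, best) state
def hcInv (d : PySem.Dict String String) (st : Int × Option String) : Prop :=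
  match st.2 with
  | none => st.1 = 13 ∧ ∀ r ∈ hcRanks, d.get? r = none
  | some s => ∃ n : Nat, st.1 = (n : Int) ∧ ∃ r, hcRanks[n]? = some r ∧
      (∀ i : Nat, i < n → ∀ r', hcRanks[i]? = some r' → d.get? r' = none) ∧
      ∃ v, d.get? r = some v ∧ s = r ++ v

theorem hcFindRank_eq (items : List (String × String)) (rank : String) :
    hcFindRank items rank =
      ((PySem.Dict.mk items).get? rank).map (fun v => "High Card: " ++ (rank ++ v)) := by
  induction items with
  | nil => rfl
  | cons p rest ih =>
      obtain ⟨k, v⟩ := p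
      rw [hcFindRank, PySem.Dict.get?_mk_cons]
      by_cases h : rank = k
      · subst h; simp
      · simp [h, Ne.symm h, ih]

theorem hcSearch_none (rs : List String) (d : PySem.Dict String String)
    (h : ∀ r ∈ rs, d.get? r = none) : hcSearch rs d = none := by
  induction rs with
  | nil => rfl
  | cons r rest ih =>
      rw [hcSearch, hcFindRank_eq]
      have := h r (by simp)
      simp [this]
      exact ih (fun r' hr' => h r' (by simp [hr']))

theorem hcSearch_found (pre post : List String) (r : String) (v : String)
    (d : PySem.Dict String String)
    (hpre : ∀ r' ∈ pre, d.get? r' = none) (hr : d.get? r = some v) :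
    hcSearch (pre ++ r :: post) d = some ("High Card: " ++ (r ++ v)) := by
  induction pre with
  | nil => rw [List.nil_append, hcSearch, hcFindRank_eq, hr]; rfl
  | cons p rest ih =>
      rw [List.cons_append, hcSearch, hcFindRank_eq]
      have := hpre p (by simp)
      simp [this]
      exact ih (fun r' hr' => hpre r' (by simp [hr']))

theorem hcRanks_nodup : hcRanks.Nodup := by decide

theorem hcOrder_some (k : String) (j : Int) (h : hcOrder.get? k = some j) :
    ∃ m : Nat, j = (m : Int) ∧ m < 13 ∧ hcRanks[m]? = some k := by
  by_cases hk : k ∈ hcRanks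
  · fin_cases hk
    · have e : hcOrder.get? "A" = some 0 := by decide
      have h' := (e.symm.trans h)
      exact ⟨0, (Option.some.inj h').symm, by decide, by decide⟩
    · have e : hcOrder.get? "K" = some 1 := by decide
      have h' := (e.symm.trans h)
      exact ⟨1, (Option.some.inj h').symm, by decide, by decide⟩
    · have e : hcOrder.get? "Q" = some 2 := by decide
      have h' := (e.symm.trans h)
      exact ⟨2, (Option.some.inj h').symm, by decide, by decide⟩
    · have e : hcOrder.get? "J" = some 3 := by decide
      have h' := (e.symm.trans h)
      exact ⟨3, (Option.some.inj h').symm, by decide, by decide⟩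
    · have e : hcOrder.get? "10" = some 4 := by decide
      have h' := (e.symm.trans h)
      exact ⟨4, (Option.some.inj h').symm, by decide, by decide⟩
    · have e : hcOrder.get? "9" = some 5 := by decide
      have h' := (e.symm.trans h)
      exact ⟨5, (Option.some.inj h').symm, by decide, by decide⟩
    · have e : hcOrder.get? "8" = some 6 := by decide
      have h' := (e.symm.trans h)
      exact ⟨6, (Option.some.inj h').symm, by decide, by decide⟩
    · have e : hcOrder.get? "7" = some 7 := by decide
      have h' := (e.symm.trans h)
      exact ⟨7, (Option.some.inj h').symm, by decide, by decide⟩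
    · have e : hcOrder.get? "6" = some 8 := by decide
      have h' := (e.symm.trans h)
      exact ⟨8, (Option.some.inj h').symm, by decide, by decide⟩
    · have e : hcOrder.get? "5" = some 9 := by decide
      have h' := (e.symm.trans h)
      exact ⟨9, (Option.some.inj h').symm, by decide, by decide⟩
    · have e : hcOrder.get? "4" = some 10 := by decide
      have h' := (e.symm.trans h)
      exact ⟨10, (Option.some.inj h').symm, by decide, by decide⟩
    · have e : hcOrder.get? "3" = some 11 := by decide
      have h' := (e.symm.trans h)
      exact ⟨11, (Option.some.inj h').symm, by decide, by decide⟩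
    · have e : hcOrder.get? "2" = some 12 := by decide
      have h' := (e.symm.trans h)
      exact ⟨12, (Option.some.inj h').symm, by decide, by decide⟩
  · exfalso
    have hnone : hcOrder.get? k = none := by
      rw [PySem.Dict.get?_eq_none_iff_not_mem_keys]
      have hkeys : hcOrder.keys = hcRanks := by decide
      rw [hkeys]; exact hk
    rw [hnone] at h; cases h

theorem hcOrder_none (k : String) (h : hcOrder.get? k = none) :
    ∀ r ∈ hcRanks, r ≠ k := by
  intro r hr he
  subst he
  fin_cases hr <;> exact absurd h (by decide)

-- distinct positions in the nodup rank list hold distinct ranks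
theorem hcRanks_ne_of_idx_ne {i j : Nat} {a b : String}
    (hi : hcRanks[i]? = some a) (hj : hcRanks[j]? = some b) (hij : i ≠ j) : a ≠ b := by
  intro hab
  subst hab
  obtain ⟨hli, hei⟩ := List.getElem?_eq_some_iff.mp hi
  obtain ⟨hlj, hej⟩ := List.getElem?_eq_some_iff.mp hj
  exact hij ((List.Nodup.getElem_inj_iff hcRanks_nodup).mp (hei.trans hej.symm))

theorem hcInv_step (d : PySem.Dict String String) (st : Int × Option String) (card : String)
    (h : hcInv d st) :
    hcInv (d.insert (hcKind card) (hcSuit card)) (hcStep st card) := by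
  obtain ⟨bi, b⟩ := st
  rw [hcStep]
  cases hget : hcOrder.get? (hcKind card) with
  | none =>
      have hne := hcOrder_none _ hget
      cases b with
      | none =>
          obtain ⟨h1, h2⟩ := h
          exact ⟨h1, fun r hr => by
            rw [PySem.Dict.get?_insert_of_ne _ _ (hne r hr)]; exact h2 r hr⟩
      | some s =>
          obtain ⟨n, hn, r, hr, habs, v, hv, hs⟩ := h
          have hrm : r ∈ hcRanks := List.mem_of_getElem? hr
          refine ⟨n, hn, r, hr, ?_, v, ?_, hs⟩
          · intro i hi r' hr'
            rw [PySem.Dict.get?_insert_of_ne _ _ (hne r' (List.mem_of_getElem? hr'))]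
            exact habs i hi r' hr'
          · rw [PySem.Dict.get?_insert_of_ne _ _ (hne r hrm)]; exact hv
  | some j =>
      obtain ⟨m, hjm, hm13, hmk⟩ := hcOrder_some _ _ hget
      by_cases hle : j ≤ bi
      · simp only [hle, if_true]
        refine ⟨m, by simp [hjm], hcKind card, hmk, ?_, hcSuit card,
          PySem.Dict.get?_insert_self _ _ _, rfl⟩
        intro i hi r' hr'
        have hne : r' ≠ hcKind card := hcRanks_ne_of_idx_ne hr' hmk (by omega)
        rw [PySem.Dict.get?_insert_of_ne _ _ hne]
        cases b with
        | none => exact h.2 r' (List.mem_of_getElem? hr')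
        | some s =>
            obtain ⟨n, hn, r, hr, habs, v, hv, hs⟩ := h
            have hn' : bi = (n : Int) := hn
            have hmn : (m : Int) ≤ (n : Int) := by rw [← hjm, ← hn']; exact hle
            have : i < n := by
              have : (i : Int) < (n : Int) :=
                lt_of_lt_of_le (by exact_mod_cast hi) hmn
              exact_mod_cast this
            exact habs i this r' hr'
      · simp only [hle, if_false]
        cases b with
        | none =>
            obtain ⟨h1, _⟩ := h
            exfalso
            have h1' : bi = 13 := h1
            apply hle
            rw [hjm, h1']
            exact_mod_cast Nat.le_of_lt hm13
        | some s =>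
            obtain ⟨n, hn, r, hr, habs, v, hv, hs⟩ := h
            have hn' : bi = (n : Int) := hn
            have hnm : n ≠ m := by
              intro he
              apply hle
              rw [hjm, hn', he]
            refine ⟨n, hn, r, hr, ?_, v, ?_, hs⟩
            · intro i hi r' hr'
              have hne : r' ≠ hcKind card := hcRanks_ne_of_idx_ne hr' hmk (by
                intro he; subst he
                apply hle
                rw [hjm, hn']
                exact_mod_cast (by omega : i ≤ n))
              rw [PySem.Dict.get?_insert_of_ne _ _ hne]
              exact habs i hi r' hr'
            · have hne : r ≠ hcKind card := hcRanks_ne_of_idx_ne hr hmk hnm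
              rw [PySem.Dict.get?_insert_of_ne _ _ hne]
              exact hv

theorem hcInv_fold (ws : List String) :
    ∀ (d : PySem.Dict String String) (st : Int × Option String), hcInv d st →
      hcInv (ws.foldl (fun d card => d.insert (hcKind card) (hcSuit card)) d)
            (ws.foldl hcStep st) := by
  induction ws with
  | nil => intro d st h; exact h
  | cons c rest ih =>
      intro d st h
      exact ih _ _ (hcInv_step d st c h)

theorem hcInv_final (d : PySem.Dict String String) (st : Int × Option String)
    (h : hcInv d st) :
    hcSearch hcRanks d = st.2.map (fun b => "High Card: " ++ b) := by
  obtain ⟨bi, b⟩ := st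
  cases b with
  | none => exact hcSearch_none _ _ h.2
  | some s =>
      obtain ⟨n, _, r, hr, habs, v, hv, hs⟩ := h
      obtain ⟨hlen, hel⟩ := List.getElem?_eq_some_iff.mp hr
      have hsplit : hcRanks = hcRanks.take n ++ r :: hcRanks.drop (n + 1) := by
        rw [← hel, ← List.drop_eq_getElem_cons hlen, List.take_append_drop]
      have hpre : ∀ r' ∈ hcRanks.take n, d.get? r' = none := by
        intro r' hr'
        obtain ⟨i, hi, he⟩ := List.getElem_of_mem hr'
        have hi' : i < n := lt_of_lt_of_le hi (by simp [List.length_take])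
        have : hcRanks[i]? = some r' := by
          rw [List.getElem?_eq_some_iff]
          refine ⟨by omega, ?_⟩
          rw [← he, List.getElem_take]
        exact habs i hi' r' this
      rw [hsplit, hcSearch_found _ _ r v d hpre hv]
      simp [hs]

-- ===== VERDICT (by name: the statement is the Claim_ definition above) =====
theorem high_card_spec : Claim_equal_high_card := by
  intro cards _
  unfold Spec_high_card high_card high_card_alt hcBuild
  have hinit : hcInv PySem.Dict.empty ((13 : Int), (none : Option String)) := by
    constructor
    · rfl
    · intro r _; exact PySem.Dict.get?_empty r
  exact hcInv_final _ _ (hcInv_fold (PySem.Str.split₀ cards) _ _ hinit)
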